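-- pv_equiv track=rewrite | github.com/houxizhu/python | codeforces/1005.div2/a.brogramming-contest.py | codeforces
-- ===== SOURCE A (Python) =====
-- def codeforces(n: int, s: str):
--     s = "0"+s
--     if s[-1] == "0":
--         s += "1"
--     else:
--         s += "0"
--     ll = len(s)
--     flag1 = 0
--     result = 0
--     for ii in range(1,ll):
--         if flag1 and s[ii] != s[ii-1]:
--             result += 1
--         if s[ii] == "1":
--             flag1 = 1
--     return result
-- ===== SOURCE B (Python) =====
-- def codeforces(n: int, s: str):
--     i = s.find('1')
--     if i == -1:
--         return 0
--     count = 0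
--     j = i
--     m = len(s)
--     while j < m:
--         head = s[j]
--         while j < m and s[j] == head:
--             j += 1
--         count += 1
--     return count
-- ===== Notes on version B (the rewrite author's own statement) =====
-- stated objective: faster
-- what changed: Replaced A's sentinel padding ('0' prefix, forced opposite-char append) and per-character flag/adjacent-transition state machine with a two-stage run-skipping algorithm: find the first '1' with s.find, then repeatedly skip whole maximal runs of equal characters with an inner loop, counting one per run; no sentinels and no adjacent-pair comparisons.
import Mathlib
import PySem

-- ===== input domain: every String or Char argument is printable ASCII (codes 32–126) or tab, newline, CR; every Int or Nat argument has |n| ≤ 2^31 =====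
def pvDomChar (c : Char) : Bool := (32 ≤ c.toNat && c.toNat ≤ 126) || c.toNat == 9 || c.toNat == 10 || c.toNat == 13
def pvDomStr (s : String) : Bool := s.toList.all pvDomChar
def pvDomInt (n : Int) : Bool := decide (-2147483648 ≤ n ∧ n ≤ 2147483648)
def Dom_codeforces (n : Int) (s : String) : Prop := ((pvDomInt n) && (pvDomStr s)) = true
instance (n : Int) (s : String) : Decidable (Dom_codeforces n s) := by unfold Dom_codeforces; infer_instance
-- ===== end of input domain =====

-- B replaces A's sentinel-padding flag/transition state machine by find-first-'1' followed by an
-- inner run-skipping loop counting one per maximal run (alternative decomposition, same O(n) cost).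

-- ===== PORT A =====
def codeforces (n : Int) (s : String) : Int :=
  let s1 : List Char := '0' :: s.toList                     -- s = "0" + s
  let s2 : List Char :=
    if PySem.List.pyGetD s1 (-1) ' ' = '0' then s1 ++ ['1'] -- if s[-1] == "0": s += "1"
    else s1 ++ ['0']                                        -- else: s += "0"
  let ll : Int := s2.length
  let st :=
    (PySem.List.pyRange 1 ll).foldl
      (fun (st : Int × Int) ii =>
        let result :=
          if st.1 ≠ 0 ∧ PySem.List.pyGetD s2 ii ' ' ≠ PySem.List.pyGetD s2 (ii - 1) ' '
          then st.2 + 1 else st.2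
        let flag1 := if PySem.List.pyGetD s2 ii ' ' = '1' then 1 else st.1
        (flag1, result))
      (0, 0)
  st.2

-- ===== PORT B =====
-- inner loop:  while j < m and s[j] == head: j += 1   (returns the new j)
def skipRun (cs : List Char) (j : Nat) (head : Char) : Nat :=
  if h : j < cs.length then
    if cs[j] = head then skipRun cs (j + 1) head else j
  else j
termination_by cs.length - j

-- termination fact the outer-loop port cites (the inner loop never moves j backwards)
theorem skipRun_ge (cs : List Char) (j : Nat) (head : Char) : j ≤ skipRun cs j head := by
  unfold skipRun
  split
  · split
    · have := skipRun_ge cs (j + 1) head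
      omega
    · exact le_refl j
  · exact le_refl j
termination_by cs.length - j

-- outer loop:  while j < m: head = s[j]; <inner loop>; count += 1
def countRuns (cs : List Char) (j : Nat) : Int :=
  if h : j < cs.length then
    1 + countRuns cs (skipRun cs (j + 1) cs[j])
  else 0
termination_by cs.length - j
decreasing_by have := skipRun_ge cs (j + 1) cs[j]; omega

def codeforces_alt (n : Int) (s : String) : Int :=
  let i := PySem.Chars.find s.toList ['1']                  -- i = s.find('1')
  if i = -1 then 0
  else countRuns s.toList i.toNat                           -- run-skipping loop from j = i

-- ===== PRECONDITION & SPEC =====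
def Spec_codeforces (n : Int) (s : String) (out : Int) : Prop := out = codeforces_alt n s
instance (n : Int) (s : String) (out : Int) : Decidable (Spec_codeforces n s out) := by unfold Spec_codeforces; infer_instance

-- ===== CLAIM (what is proved, stated in full; the proofs are below) =====
def Claim_equal_codeforces : Prop := ∀ (n : Int) (s : String), Dom_codeforces n s → Spec_codeforces n s (codeforces n s)

-- ===== LEMMAS AND PROOFS =====

-- number of adjacent unequal pairs
def adjC : List Char → Int
  | [] => 0
  | [_] => 0
  | a :: b :: r => (if a ≠ b then 1 else 0) + adjC (b :: r)

theorem adjC_append_singleton (l : List Char) (h : l ≠ []) (x : Char) :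
    adjC (l ++ [x]) = adjC l + (if l.getLast h ≠ x then 1 else 0) := by
  induction l with
  | nil => simp at h
  | cons a r ih =>
    cases r with
    | nil => simp [adjC]
    | cons b r' =>
      have := ih (by simp)
      simp only [List.cons_append, adjC] at *
      rw [this]
      simp [List.getLast]
      split_ifs <;> ring

theorem getLast_dropWhile (p : Char → Bool) (l : List Char) (h : l.dropWhile p ≠ []) (h' : l ≠ []) :
    (l.dropWhile p).getLast h = l.getLast h' := by
  induction l with
  | nil => simp at h'
  | cons a r ih =>
    by_cases hp : p a
    · have hr : r.dropWhile p ≠ [] := by simpa [List.dropWhile_cons, hp] using h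
      have hrne : r ≠ [] := by rintro rfl; simp at hr
      have := ih (by simpa [List.dropWhile_cons, hp] using h) hrne
      simp only [List.dropWhile_cons, hp, if_true, List.getLast_cons hrne]
      exact this
    · simp [List.dropWhile_cons, hp]

theorem dropWhile_eq_drop_of (l : List Char) (m : Nat) (hm : m < l.length)
    (h1 : l[m] = '1')
    (h2 : ∀ k (hk : k < l.length), k < m → l[k] ≠ '1') :
    l.dropWhile (fun c => c ≠ '1') = l.drop m := by
  induction l generalizing m with
  | nil => simp at hm
  | cons a r ih =>
    cases m with
    | zero =>
      simp only [List.getElem_cons_zero] at h1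
      subst h1
      simp [List.dropWhile_cons]
    | succ m' =>
      have ha : a ≠ '1' := h2 0 (by simp) (by omega)
      rw [List.dropWhile_cons, if_pos (by simpa using ha), List.drop_succ_cons]
      exact ih m' (by simpa using hm) (by simpa using h1)
        (fun k hk hkm => h2 (k+1) (by simpa using hk) (by omega))

theorem loopA (L : List Char) (j : Nat) (hj : j ≤ L.length) :
    ((PySem.List.pyRange 1 (1 + (j : Int))).foldl
      (fun (st : Int × Int) ii =>
        let result :=
          if st.1 ≠ 0 ∧ PySem.List.pyGetD ('0' :: L) ii ' ' ≠ PySem.List.pyGetD ('0' :: L) (ii - 1) ' '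
          then st.2 + 1 else st.2
        let flag1 := if PySem.List.pyGetD ('0' :: L) ii ' ' = '1' then 1 else st.1
        (flag1, result))
      (0, 0))
    = ((if '1' ∈ L.take j then 1 else 0 : Int),
       adjC ((L.take j).dropWhile (fun c => c ≠ '1'))) := by
  induction j with
  | zero =>
    norm_num
    simp [PySem.List.pyRange, adjC]
  | succ j ih =>
    have hjL : j < L.length := by omega
    have h1 : (1 + ((j + 1 : Nat) : Int)) = (1 + (j : Int)) + 1 := by push_cast; ring
    rw [h1, PySem.List.pyRange_one_succ_right (by omega), List.foldl_append,
      ih (by omega)]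
    simp only [List.foldl_cons, List.foldl_nil]
    have e1 : PySem.List.pyGetD ('0' :: L) (1 + (j : Int)) ' ' = L[j] := by
      have h : (1 + (j : Int)) = ((j + 1 : Nat) : Int) := by push_cast; ring
      rw [h, PySem.List.pyGetD_natCast]
      simp [List.getD_eq_getElem?_getD, List.getElem?_eq_getElem hjL]
    have e0 : PySem.List.pyGetD ('0' :: L) (1 + (j : Int) - 1) ' ' = ('0' :: L).getD j ' ' := by
      have h : (1 + (j : Int) - 1) = ((j : Nat) : Int) := by push_cast; ring
      rw [h, PySem.List.pyGetD_natCast]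
    have ht : L.take (j + 1) = L.take j ++ [L[j]] := by
      rw [List.take_succ]
      simp [List.getElem?_eq_getElem hjL]
    rw [e1, e0, ht]
    simp only [Prod.mk.injEq]
    have hmemiff : ('1' ∈ L.take j ++ [L[j]]) ↔ ('1' ∈ L.take j ∨ '1' = L[j]) := by
      rw [List.mem_append, List.mem_singleton]
    by_cases hmem : '1' ∈ L.take j
    · have hj0 : j ≠ 0 := by rintro rfl; simp at hmem
      have htne : (L.take j).dropWhile (fun c => c ≠ '1') ≠ [] := by
        intro hnil
        have := (List.dropWhile_eq_nil_iff).mp hnil '1' hmem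
        simp at this
      have hdw : (L.take j ++ [L[j]]).dropWhile (fun c => c ≠ '1')
          = (L.take j).dropWhile (fun c => c ≠ '1') ++ [L[j]] := by
        have hemp : ((L.take j).dropWhile (fun c => c ≠ '1')).isEmpty = false := by
          simp [List.isEmpty_iff, htne]
          exact hmem
        rw [List.dropWhile_append, hemp]
        simp
      have hlast : ((L.take j).dropWhile (fun c => c ≠ '1')).getLast htne
          = ('0' :: L).getD j ' ' := by
        have htake : L.take j ≠ [] := by
          have hlen : 0 < (L.take j).length := by
            simp only [List.length_take]
            omega
          intro h
          rw [h] at hlen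
          simp at hlen
        rw [getLast_dropWhile _ _ htne htake]
        rw [List.getLast_eq_getElem]
        have hgd : ('0' :: L).getD j ' ' = L[j - 1] := by
          cases j with
          | zero => omega
          | succ j' =>
            simp [List.getD_eq_getElem?_getD, List.getElem?_eq_getElem (show j' < L.length by omega)]
        rw [hgd]
        simp only [List.getElem_take]
        congr 1
        simp only [List.length_take]
        omega
      constructor
      · rw [if_pos (hmemiff.mpr (Or.inl hmem))]
        by_cases hx : L[j] = '1' <;> simp [hx, hmem]
      · rw [hdw, adjC_append_singleton _ htne, hlast]
        rw [if_pos hmem]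
        by_cases hne : L[j] = ('0' :: L).getD j ' '
        · rw [if_neg (by simp [hne]), if_neg (by simp [hne]), add_zero]
        · rw [if_pos ⟨one_ne_zero, hne⟩, if_pos (Ne.symm hne)]
    · have hdwnil : (L.take j).dropWhile (fun c => c ≠ '1') = [] := by
        rw [List.dropWhile_eq_nil_iff]
        intro x hx
        simp
        rintro rfl
        exact hmem hx
      have hdw : (L.take j ++ [L[j]]).dropWhile (fun c => c ≠ '1')
          = [L[j]].dropWhile (fun c => c ≠ '1') := by
        have hemp : ((L.take j).dropWhile (fun c => c ≠ '1')).isEmpty = true := by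
          rw [hdwnil]
          rfl
        rw [List.dropWhile_append, hemp]
        simp
      constructor
      · by_cases hx : '1' = L[j]
        · rw [if_pos (hmemiff.mpr (Or.inr hx)), if_pos hx.symm]
        · rw [if_neg (fun h => (hmemiff.mp h).elim hmem hx),
              if_neg (fun h => hx h.symm), if_neg hmem]
      · rw [hdw, hdwnil]
        by_cases hx : L[j] = '1' <;> simp [hx, adjC, hmem]

theorem pyGetD_neg_one_cons (a : Char) (l : List Char) :
    PySem.List.pyGetD (a :: l) (-1) ' ' = (a :: l).getLast (by simp) := by
  conv_lhs => rw [← List.dropLast_append_getLast (l := a :: l) (by simp)]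
  rw [PySem.List.pyGetD_neg_one_append_singleton]

-- characterization of the inner run-skipping loop
theorem drop_skipRun (cs : List Char) (j : Nat) (head : Char) :
    cs.drop (skipRun cs j head) = (cs.drop j).dropWhile (fun c => c = head) := by
  unfold skipRun
  split
  · rename_i h
    rw [List.drop_eq_getElem_cons h, List.dropWhile_cons]
    split
    · rename_i heq
      rw [if_pos (by simpa using heq)]
      exact drop_skipRun cs (j + 1) head
    · rename_i hne
      rw [if_neg (by simpa using hne), ← List.drop_eq_getElem_cons h]
  · rename_i h
    rw [List.drop_eq_nil_of_le (by omega)]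
    simp
termination_by cs.length - j

-- list-level description of the outer loop: one per maximal run
def runsL : List Char → Int
  | [] => 0
  | a :: r => 1 + runsL (r.dropWhile (fun c => c = a))
termination_by t => t.length
decreasing_by simp; have := List.length_dropWhile_le (fun c => c = a) r; omega

theorem countRuns_eq_runsL (cs : List Char) (j : Nat) :
    countRuns cs j = runsL (cs.drop j) := by
  unfold countRuns
  split
  · rename_i h
    have hskip := skipRun_ge cs (j + 1) cs[j]
    have := countRuns_eq_runsL cs (skipRun cs (j + 1) cs[j])
    rw [this, drop_skipRun, List.drop_eq_getElem_cons h, runsL]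
  · rename_i h
    rw [List.drop_eq_nil_of_le (by omega), runsL]
termination_by cs.length - j
decreasing_by have := skipRun_ge cs (j + 1) cs[j]; omega

theorem runsL_eq_adjC (t : List Char) (h : t ≠ []) : runsL t = 1 + adjC t := by
  induction t with
  | nil => simp at h
  | cons a r ih =>
    cases r with
    | nil => simp [runsL, adjC]
    | cons b r' =>
      have hstep : runsL (b :: r') = 1 + runsL (r'.dropWhile (fun c => c = b)) := by
        rw [runsL]
      by_cases hb : b = a
      · subst hb
        rw [runsL, show ((b :: r').dropWhile (fun c => c = b)) = r'.dropWhile (fun c => c = b) by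
              simp, ← hstep, ih (by simp), adjC]
        simp
      · rw [runsL, show ((b :: r').dropWhile (fun c => c = a)) = b :: r' by
              simp [hb], ih (by simp), adjC]
        rw [if_pos (fun hc => hb hc.symm)]

theorem main_case (cs : List Char) (sent : Char)
    (hsent : ∀ h : cs ≠ [], sent ≠ cs.getLast h) :
    (List.foldl
      (fun (st : Int × Int) ii =>
        let result :=
          if st.1 ≠ 0 ∧ PySem.List.pyGetD ('0' :: (cs ++ [sent])) ii ' '
              ≠ PySem.List.pyGetD ('0' :: (cs ++ [sent])) (ii - 1) ' '
          then st.2 + 1 else st.2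
        let flag1 := if PySem.List.pyGetD ('0' :: (cs ++ [sent])) ii ' ' = '1' then 1 else st.1
        (flag1, result))
      (0, 0)
      (PySem.List.pyRange 1 (('0' :: (cs ++ [sent])).length : Int))).2
    =
    (if PySem.Chars.find cs ['1'] = -1 then 0
     else countRuns cs (PySem.Chars.find cs ['1']).toNat) := by
  have hlen : ((('0' :: (cs ++ [sent])).length : Nat) : Int)
      = 1 + (((cs ++ [sent]).length : Nat) : Int) := by
    simp only [List.length_cons]
    push_cast
    ring
  rw [hlen, loopA (cs ++ [sent]) (cs ++ [sent]).length le_rfl, List.take_length]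
  simp only []
  by_cases hin : '1' ∈ cs
  · have hcsne : cs ≠ [] := by rintro rfl; simp at hin
    have hinf : ['1'] <:+: cs := by
      obtain ⟨l1, l2, rfl⟩ := List.append_of_mem hin
      exact ⟨l1, l2, by simp⟩
    have hfind_ne : PySem.Chars.find cs ['1'] ≠ -1 := by
      rw [Ne, PySem.Chars.find_eq_neg_one_iff]
      exact fun h => h hinf
    rw [if_neg hfind_ne]
    obtain ⟨hge, hpre, hmin⟩ := PySem.Chars.findFrom_natCast_spec cs ['1'] 0 (by simp)
      (by rwa [show ((0 : Nat) : Int) = 0 by norm_num, PySem.Chars.findFrom_zero])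
    rw [show ((0 : Nat) : Int) = 0 by norm_num, PySem.Chars.findFrom_zero] at hge hpre hmin
    obtain ⟨rest, hrest⟩ := hpre
    have hdropne : cs.drop (PySem.Chars.find cs ['1']).toNat ≠ [] := by
      rw [← hrest]
      simp
    have hlt : (PySem.Chars.find cs ['1']).toNat < cs.length := by
      by_contra h
      push_neg at h
      exact hdropne (List.drop_eq_nil_of_le h)
    have hget1 : cs[(PySem.Chars.find cs ['1']).toNat] = '1' := by
      have hd := List.drop_eq_getElem_cons hlt
      rw [hd] at hrest
      injection hrest with h1 _
      exact h1.symm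
    have hbefore : ∀ k (hk : k < cs.length), k < (PySem.Chars.find cs ['1']).toNat →
        cs[k] ≠ '1' := by
      intro k hk hki h1
      refine hmin k (Nat.zero_le k) hki ⟨cs.drop (k + 1), ?_⟩
      rw [List.drop_eq_getElem_cons hk, h1]
      rfl
    have hdw_eq : cs.dropWhile (fun c => c ≠ '1') = cs.drop (PySem.Chars.find cs ['1']).toNat :=
      dropWhile_eq_drop_of cs _ hlt hget1 hbefore
    have htne : cs.dropWhile (fun c => c ≠ '1') ≠ [] := by
      rw [hdw_eq]
      exact hdropne
    have hemp : (cs.dropWhile (fun c => c ≠ '1')).isEmpty = false := by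
      simp [List.isEmpty_iff, htne]
      exact hin
    rw [List.dropWhile_append, hemp]
    simp only [Bool.false_eq_true, if_false]
    rw [adjC_append_singleton _ htne]
    have hlast2 : (cs.dropWhile (fun c => c ≠ '1')).getLast htne = cs.getLast hcsne := by
      rw [getLast_dropWhile _ _ htne hcsne]
    rw [hlast2, if_pos (fun h => hsent hcsne h.symm)]
    rw [countRuns_eq_runsL, ← hdw_eq, runsL_eq_adjC _ htne]
    ring
  · have hfind : PySem.Chars.find cs ['1'] = -1 := by
      rw [PySem.Chars.find_eq_neg_one_iff]
      rintro ⟨l1, l2, hh⟩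
      exact hin (hh ▸ (by simp))
    rw [if_pos hfind]
    have hdwnil : cs.dropWhile (fun c => c ≠ '1') = [] := by
      rw [List.dropWhile_eq_nil_iff]
      intro x hx
      simp
      rintro rfl
      exact hin hx
    have hemp : (cs.dropWhile (fun c => c ≠ '1')).isEmpty = true := by
      rw [hdwnil]
      rfl
    rw [List.dropWhile_append, hemp]
    simp only [if_true]
    by_cases hs1 : sent = '1' <;> simp [hs1, adjC]

-- ===== VERDICT =====
theorem codeforces_spec : Claim_equal_codeforces := by
  intro n s _
  unfold Spec_codeforces
  simp only [codeforces, codeforces_alt]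
  rw [pyGetD_neg_one_cons]
  by_cases h0 : ('0' :: s.toList).getLast (by simp) = '0'
  · rw [if_pos h0]
    simp only [List.cons_append]
    exact main_case s.toList '1' (fun h => by
      rw [← List.getLast_cons (a := '0') h, h0]
      decide)
  · rw [if_neg h0]
    simp only [List.cons_append]
    exact main_case s.toList '0' (fun h => by
      rw [← List.getLast_cons (a := '0') h]
      exact fun hc => h0 hc.symm)
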